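-- pv_equiv track=rewrite | github.com/Haroong/Algorithm | BaekJoon Online Judge/Silver/21921-블로그.py | max_blog_visitors
-- ===== SOURCE A (Python) =====
-- def max_blog_visitors(stats, streak_day):
--     count = 1 # 방문자가 최대로 많았던 기간 횟수
--     streak_sum = sum(stats[:streak_day])
--     blog_visitor_stats = streak_sum
--
--     for i in range(streak_day, len(stats)):
--         streak_sum += stats[i] - stats[i-streak_day]
--
--         if streak_sum > blog_visitor_stats:
--             blog_visitor_stats = streak_sum
--             count = 1
--         elif  streak_sum == blog_visitor_stats:
--             count += 1
--
--     return blog_visitor_stats, count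
-- ===== SOURCE B (Python) =====
-- def max_blog_visitors(stats, streak_day):
--     # prefix sums, then one scan of window sums pref[k+streak_day]-pref[k]
--     pref = [0]
--     acc = 0
--     for x in stats:
--         acc += x
--         pref.append(acc)
--     n = len(stats)
--     best = pref[min(streak_day, n)]
--     count = 1
--     for k in range(1, n - streak_day + 1):
--         w = pref[k + streak_day] - pref[k]
--         if w > best:
--             best, count = w, 1
--         elif w == best:
--             count += 1
--     return best, count
-- ===== Notes on version B (the rewrite author's own statement) =====
-- stated objective: alternative
-- what changed: B builds a prefix-sum array once and scans the window sums pref[k+streak_day]-pref[k] directly, instead of A's sliding-window add/subtract update of a running sum.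
import Mathlib
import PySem

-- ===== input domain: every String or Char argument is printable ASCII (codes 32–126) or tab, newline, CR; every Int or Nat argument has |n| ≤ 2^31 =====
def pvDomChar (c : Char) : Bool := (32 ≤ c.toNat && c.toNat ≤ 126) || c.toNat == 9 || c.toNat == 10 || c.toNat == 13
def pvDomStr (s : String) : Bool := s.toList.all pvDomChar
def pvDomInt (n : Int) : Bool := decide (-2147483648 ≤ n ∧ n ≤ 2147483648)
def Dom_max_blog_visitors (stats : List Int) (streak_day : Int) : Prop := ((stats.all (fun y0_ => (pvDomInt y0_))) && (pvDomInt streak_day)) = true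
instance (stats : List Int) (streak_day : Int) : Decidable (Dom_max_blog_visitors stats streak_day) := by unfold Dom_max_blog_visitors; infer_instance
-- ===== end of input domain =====

-- B replaces A's sliding-window difference update with a prefix-sum array scanned once (alternative decomposition, same O(n) cost).

-- ===== PORT A =====
def max_blog_visitors (stats : List Int) (streak_day : Int) : Int × Int :=
  let init := (PySem.List.slice stats none (some streak_day)).sum
  let r := (PySem.List.pyRange streak_day (stats.length : Int) 1).foldl
    (fun st i =>
      let ss := st.1 + PySem.List.pyGetD stats i 0 - PySem.List.pyGetD stats (i - streak_day) 0
      if ss > st.2.1 then (ss, ss, 1)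
      else if ss = st.2.1 then (ss, st.2.1, st.2.2 + 1)
      else (ss, st.2.1, st.2.2))
    (init, init, 1)
  (r.2.1, r.2.2)

-- ===== PORT B =====
def max_blog_visitors_alt (stats : List Int) (streak_day : Int) : Int × Int :=
  let pa := stats.foldl
    (fun (p : List Int × Int) x => (p.1 ++ [p.2 + x], p.2 + x)) ([0], 0)
  let pref := pa.1
  let n : Int := (stats.length : Int)
  let best := PySem.List.pyGetD pref (min streak_day n) 0
  (PySem.List.pyRange 1 (n - streak_day + 1) 1).foldl
    (fun (bc : Int × Int) k =>
      let w := PySem.List.pyGetD pref (k + streak_day) 0 - PySem.List.pyGetD pref k 0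
      if w > bc.1 then (w, 1)
      else if w = bc.1 then (bc.1, bc.2 + 1)
      else bc)
    (best, 1)

-- ===== PRECONDITION & SPEC =====
-- Pre_ excludes exactly streak_day < 0, where the Python A raises IndexError for every stats list.
def Pre_max_blog_visitors (stats : List Int) (streak_day : Int) : Prop := 0 ≤ streak_day
instance (stats : List Int) (streak_day : Int) : Decidable (Pre_max_blog_visitors stats streak_day) := by unfold Pre_max_blog_visitors; infer_instance

def pvWitness_max_blog_visitors : List Int × Int := ([1, 4, 2, 5, 3, 1], 2)

def Spec_max_blog_visitors (stats : List Int) (streak_day : Int) (out : Int × Int) : Prop := out = max_blog_visitors_alt stats streak_day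
instance (stats : List Int) (streak_day : Int) (out : Int × Int) : Decidable (Spec_max_blog_visitors stats streak_day out) := by unfold Spec_max_blog_visitors; infer_instance

-- ===== CLAIM (what is proved, stated in full; the proofs are below) =====
def Claim_equal_max_blog_visitors : Prop := ∀ (stats : List Int) (streak_day : Int), Dom_max_blog_visitors stats streak_day → Pre_max_blog_visitors stats streak_day → Spec_max_blog_visitors stats streak_day (max_blog_visitors stats streak_day)

-- ===== LEMMAS AND PROOFS =====

-- window sum of length s starting at position j
def pvW (stats : List Int) (s j : Nat) : Int := ((stats.drop j).take s).sum

-- the best/count update both loops perform on each new window value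
def pvStep (bc : Int × Int) (w : Int) : Int × Int :=
  if w > bc.1 then (w, 1) else if w = bc.1 then (bc.1, bc.2 + 1) else bc

-- prefix sums of stats (pref[i] = sum of the first i elements)
def pvPref (stats : List Int) : List Int :=
  (List.range (stats.length + 1)).map (fun i => (stats.take i).sum)

lemma pvPrefFold : ∀ (l : List Int) (p : List Int) (c : Int),
    l.foldl (fun (q : List Int × Int) x => (q.1 ++ [q.2 + x], q.2 + x)) (p, c)
      = (p ++ (List.range l.length).map (fun i => c + (l.take (i + 1)).sum), c + l.sum) := by
  intro l
  induction l with
  | nil => intro p c; simp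
  | cons x xs ih =>
    intro p c
    simp only [List.foldl_cons]
    rw [ih]
    simp [List.range_succ_eq_map, List.map_map, Function.comp, add_assoc, List.append_assoc]

lemma pvPref_eq (stats : List Int) :
    (stats.foldl (fun (q : List Int × Int) x => (q.1 ++ [q.2 + x], q.2 + x)) ([0], 0)).1
      = pvPref stats := by
  rw [pvPrefFold]
  simp [pvPref, List.range_succ_eq_map, List.map_map, Function.comp]

lemma pvPref_get (stats : List Int) (j : Nat) (hj : j ≤ stats.length) :
    PySem.List.pyGetD (pvPref stats) ((j : Nat) : Int) 0 = (stats.take j).sum := by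
  rw [PySem.List.pyGetD_natCast]
  simp [pvPref, List.getD, Nat.lt_succ_of_le hj]

lemma pvTake_succ_sum (stats : List Int) (k : Nat) (hk : k < stats.length) :
    (stats.take (k + 1)).sum = (stats.take k).sum + stats.getD k 0 := by
  rw [List.take_add_one, List.sum_append]
  congr 1
  simp [List.getD, List.getElem?_eq_getElem hk]

lemma pvTake_sub (stats : List Int) (s j : Nat) :
    (stats.take (j + s)).sum - (stats.take j).sum = pvW stats s j := by
  rw [List.take_add]
  simp [pvW]

lemma pvW_step (stats : List Int) (s j : Nat) (h : j + s < stats.length) :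
    pvW stats s j + stats.getD (j + s) 0 - stats.getD j 0 = pvW stats s (j + 1) := by
  rw [← pvTake_sub, ← pvTake_sub]
  have h1 := pvTake_succ_sum stats (j + s) h
  have h2 := pvTake_succ_sum stats j (by omega)
  have h3 : j + 1 + s = (j + s) + 1 := by omega
  rw [h3, h1, h2]
  ring

-- A's loop, started at window j with the window sum as running state, folds pvStep over the remaining window sums
lemma pvA_loop (stats : List Int) (s : Nat) :
    ∀ (m j : Nat) (bc : Int × Int), j + m + s = stats.length →
    ((PySem.List.pyRange (((s + j : Nat) : Int)) (stats.length : Int) 1).foldl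
      (fun st i =>
        let ss := st.1 + PySem.List.pyGetD stats i 0 - PySem.List.pyGetD stats (i - ((s : Nat) : Int)) 0
        if ss > st.2.1 then (ss, ss, 1)
        else if ss = st.2.1 then (ss, st.2.1, st.2.2 + 1)
        else (ss, st.2.1, st.2.2))
      (pvW stats s j, bc)).2
    = ((List.range' (j + 1) m).map (pvW stats s)).foldl pvStep bc := by
  intro m
  induction m with
  | zero =>
    intro j bc h
    rw [PySem.List.pyRange_one_eq_nil (by omega)]
    simp
  | succ m ih =>
    intro j bc h
    rw [PySem.List.pyRange_one_cons (by push_cast; omega)]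
    rw [List.range'_succ]
    simp only [List.foldl_cons, List.map_cons]
    have hget1 : PySem.List.pyGetD stats ((s + j : Nat) : Int) 0 = stats.getD (j + s) 0 := by
      rw [PySem.List.pyGetD_natCast]; congr 1; omega
    have hsub : ((s + j : Nat) : Int) - ((s : Nat) : Int) = ((j : Nat) : Int) := by push_cast; ring
    have hget2 : PySem.List.pyGetD stats (((s + j : Nat) : Int) - ((s : Nat) : Int)) 0 = stats.getD j 0 := by
      rw [hsub, PySem.List.pyGetD_natCast]
    simp only [hget1, hget2]
    have hw : pvW stats s j + stats.getD (j + s) 0 - stats.getD j 0 = pvW stats s (j + 1) :=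
      pvW_step stats s j (by omega)
    rw [hw]
    have hcast : ((s + j : Nat) : Int) + 1 = ((s + (j + 1) : Nat) : Int) := by push_cast; ring
    rw [hcast]
    have hih := ih (j + 1) (pvStep bc (pvW stats s (j + 1))) (by omega)
    rw [← hih]
    congr 1
    simp only [pvStep]
    split_ifs <;> rfl

-- B's loop over the remaining prefix-sum differences folds pvStep over the same window sums
lemma pvB_loop (stats : List Int) (s : Nat) :
    ∀ (m j : Nat) (bc : Int × Int), j + m + s = stats.length →
    (PySem.List.pyRange (((j + 1 : Nat) : Int)) ((stats.length : Int) - ((s : Nat) : Int) + 1) 1).foldl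
      (fun (bc : Int × Int) k =>
        let w := PySem.List.pyGetD (pvPref stats) (k + ((s : Nat) : Int)) 0
                 - PySem.List.pyGetD (pvPref stats) k 0
        if w > bc.1 then (w, 1)
        else if w = bc.1 then (bc.1, bc.2 + 1)
        else bc)
      bc
    = ((List.range' (j + 1) m).map (pvW stats s)).foldl pvStep bc := by
  intro m
  induction m with
  | zero =>
    intro j bc h
    rw [PySem.List.pyRange_one_eq_nil (by push_cast; omega)]
    simp
  | succ m ih =>
    intro j bc h
    rw [PySem.List.pyRange_one_cons (by push_cast; omega)]
    rw [List.range'_succ]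
    simp only [List.foldl_cons, List.map_cons]
    have hadd : ((j + 1 : Nat) : Int) + ((s : Nat) : Int) = ((j + 1 + s : Nat) : Int) := by push_cast; ring
    have hg1 : PySem.List.pyGetD (pvPref stats) (((j + 1 : Nat) : Int) + ((s : Nat) : Int)) 0
        = (stats.take (j + 1 + s)).sum := by
      rw [hadd, pvPref_get stats (j + 1 + s) (by omega)]
    have hg2 : PySem.List.pyGetD (pvPref stats) ((j + 1 : Nat) : Int) 0
        = (stats.take (j + 1)).sum := pvPref_get stats (j + 1) (by omega)
    simp only [hg1, hg2]
    have hw : (stats.take (j + 1 + s)).sum - (stats.take (j + 1)).sum = pvW stats s (j + 1) :=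
      pvTake_sub stats s (j + 1)
    rw [hw]
    have hcast : ((j + 1 : Nat) : Int) + 1 = ((j + 1 + 1 : Nat) : Int) := by push_cast; ring
    rw [hcast]
    have hih := ih (j + 1) (pvStep bc (pvW stats s (j + 1))) (by omega)
    rw [← hih]
    congr 1

lemma pv_main (stats : List Int) (streak_day : Int) (hpre : 0 ≤ streak_day) :
    max_blog_visitors stats streak_day = max_blog_visitors_alt stats streak_day := by
  obtain ⟨s, rfl⟩ : ∃ s : Nat, streak_day = (s : Int) := ⟨streak_day.toNat, (Int.toNat_of_nonneg hpre).symm⟩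
  simp only [max_blog_visitors, max_blog_visitors_alt]
  rw [pvPref_eq]
  rw [PySem.List.slice_to_natCast]
  by_cases hs : s ≤ stats.length
  · -- common case: the window fits in the list
    have hinit : (stats.take s).sum = pvW stats s 0 := by simp [pvW]
    have hmin : min ((s : Nat) : Int) ((stats.length : Nat) : Int) = ((s : Nat) : Int) := by
      simp; exact_mod_cast hs
    rw [hmin, pvPref_get stats s hs, hinit]
    have hA := pvA_loop stats s (stats.length - s) 0 (pvW stats s 0, 1) (by omega)
    have hB := pvB_loop stats s (stats.length - s) 0 (pvW stats s 0, 1) (by omega)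
    simp only [Nat.add_zero, Nat.zero_add] at hA hB
    norm_num at hA hB
    rw [hA, hB]
  · -- degenerate case: the window is longer than the list (both loops are empty)
    rw [not_le] at hs
    rw [PySem.List.pyRange_one_eq_nil (by exact_mod_cast hs.le)]
    rw [PySem.List.pyRange_one_eq_nil (by omega)]
    have hmin : min ((s : Nat) : Int) ((stats.length : Nat) : Int) = ((stats.length : Nat) : Int) := by
      simp; exact_mod_cast hs.le
    rw [hmin, pvPref_get stats stats.length le_rfl]
    simp [List.take_of_length_le hs.le]

-- ===== VERDICT (by name: the statement is the Claim_ definition above) =====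
theorem max_blog_visitors_spec : Claim_equal_max_blog_visitors := by
  intro stats streak_day _ hpre
  exact pv_main stats streak_day hpre
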